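-- pv_equiv track=rewrite | github.com/doyedele1/algo-series | Questions/OA/Amazon/Minimize Memory/solution.py | minimizeMemory
-- ===== SOURCE A (Python) =====
-- def minimizeMemory(processes, m):
--     windowStart = prefSum = maxSum = 0
--     totalSum = sum(processes)
--
--     for i in range(len(processes)):
--         windowSize = (i - windowStart) + 1
--         prefSum += processes[i]
--         if windowSize == m:
--             maxSum= max(maxSum, prefSum)
--             prefSum -= processes[windowStart]
--             windowStart += 1
--
--     res = totalSum - maxSum
--     return res
-- ===== SOURCE B (Python) =====
-- def minimizeMemory(processes, m):
--     n = len(processes)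
--     pref = [0]
--     run = 0
--     for x in processes:
--         run += x
--         pref.append(run)
--     maxSum = 0
--     if 1 <= m <= n:
--         for i in range(n - m + 1):
--             maxSum = max(maxSum, pref[i + m] - pref[i])
--     return run - maxSum
-- ===== Notes on version B (the rewrite author's own statement) =====
-- stated objective: alternative
-- what changed: Replaces the sliding-window state machine (windowStart/prefSum maintained per step) with a precomputed prefix-sum table followed by a separate guarded indexed scan over all windows of size m.
import Mathlib
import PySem

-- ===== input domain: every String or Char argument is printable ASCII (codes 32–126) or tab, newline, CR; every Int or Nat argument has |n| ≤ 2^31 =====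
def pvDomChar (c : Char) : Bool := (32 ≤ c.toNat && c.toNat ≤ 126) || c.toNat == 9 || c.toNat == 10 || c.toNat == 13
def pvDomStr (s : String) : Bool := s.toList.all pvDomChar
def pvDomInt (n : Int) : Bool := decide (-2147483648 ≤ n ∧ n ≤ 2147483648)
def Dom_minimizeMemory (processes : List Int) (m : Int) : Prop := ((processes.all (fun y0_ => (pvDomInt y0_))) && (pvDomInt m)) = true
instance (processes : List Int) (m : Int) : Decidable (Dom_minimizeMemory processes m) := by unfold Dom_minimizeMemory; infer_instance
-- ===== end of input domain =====

-- B replaces A's sliding-window state machine by a prefix-sum table plus a separate guarded indexed scan (alternative decomposition, same cost).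

-- ===== PORT A =====
def minimizeMemory (processes : List Int) (m : Int) : Int :=
  let totalSum := processes.sum
  let st := (PySem.List.pyRange 0 (processes.length : Int) 1).foldl
    (fun (s : Int × Int × Int) i =>
      if (i - s.1) + 1 = m then
        (s.1 + 1,
         s.2.1 + PySem.List.pyGetD processes i 0 - PySem.List.pyGetD processes s.1 0,
         max s.2.2 (s.2.1 + PySem.List.pyGetD processes i 0))
      else (s.1, s.2.1 + PySem.List.pyGetD processes i 0, s.2.2)) (0, 0, 0)
  totalSum - st.2.2

-- ===== PORT B =====
def minimizeMemory_alt (processes : List Int) (m : Int) : Int :=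
  let n : Int := processes.length
  let pr := processes.foldl (fun (s : List Int × Int) x =>
      (s.1 ++ [s.2 + x], s.2 + x)) ([0], 0)
  let maxSum := if 1 ≤ m ∧ m ≤ n then
      (PySem.List.pyRange 0 (n - m + 1) 1).foldl
        (fun acc i => max acc (PySem.List.pyGetD pr.1 (i + m) 0 - PySem.List.pyGetD pr.1 i 0)) 0
    else 0
  pr.2 - maxSum

-- ===== PRECONDITION & SPEC =====
def Spec_minimizeMemory (processes : List Int) (m : Int) (out : Int) : Prop := out = minimizeMemory_alt processes m
instance (processes : List Int) (m : Int) (out : Int) : Decidable (Spec_minimizeMemory processes m out) := by unfold Spec_minimizeMemory; infer_instance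

-- ===== CLAIM (what is proved, stated in full; the proofs are below) =====
def Claim_equal_minimizeMemory : Prop := ∀ (processes : List Int) (m : Int), Dom_minimizeMemory processes m → Spec_minimizeMemory processes m (minimizeMemory processes m)

-- ===== LEMMAS AND PROOFS =====

-- prefix sum of the first k elements
def pvS (xs : List Int) (k : Nat) : Int := (xs.take k).sum

-- the list of running sums produced by B's first loop
def pvPsums (r : Int) : List Int → List Int
  | [] => []
  | x :: xs => (r + x) :: pvPsums (r + x) xs

lemma pvS_succ (xs : List Int) (k : Nat) (hk : k < xs.length) :
    pvS xs (k + 1) = pvS xs k + xs.getD k 0 := by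
  unfold pvS
  rw [List.take_add_one, List.sum_append]
  simp [List.getD, List.getElem?_eq_getElem hk]

lemma pvFoldB (xs : List Int) : ∀ (l : List Int) (r : Int),
    xs.foldl (fun (s : List Int × Int) x => (s.1 ++ [s.2 + x], s.2 + x)) (l, r)
      = (l ++ pvPsums r xs, r + xs.sum) := by
  induction xs with
  | nil => intro l r; simp [pvPsums]
  | cons x xs ih =>
      intro l r
      simp only [List.foldl_cons, ih, pvPsums, List.sum_cons, Prod.mk.injEq]
      constructor
      · simp
      · ring

lemma pvPsums_getD (xs : List Int) : ∀ (r : Int) (j : Nat), j < xs.length →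
    (pvPsums r xs).getD j 0 = r + pvS xs (j + 1) := by
  induction xs with
  | nil => intro r j h; simp at h
  | cons x xs ih =>
      intro r j h
      cases j with
      | zero => simp [pvPsums, pvS]
      | succ j =>
          have h' := ih (r + x) j (by simpa using h)
          have hs : pvS (x :: xs) (j + 2) = x + pvS xs (j + 1) := by
            simp [pvS, List.take_succ_cons]
          simp only [pvPsums, List.getD_cons_succ, h', hs]
          ring

lemma pvPref_getD (xs : List Int) (j : Nat) (hj : j ≤ xs.length) :
    (0 :: pvPsums 0 xs).getD j 0 = pvS xs j := by
  cases j with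
  | zero => simp [pvS]
  | succ j =>
      have := pvPsums_getD xs 0 j (by omega)
      simpa using this

-- A's loop step and its iterate
def pvAstep (processes : List Int) (m : Int) (s : Int × Int × Int) (i : Int) : Int × Int × Int :=
  if (i - s.1) + 1 = m then
    (s.1 + 1,
     s.2.1 + PySem.List.pyGetD processes i 0 - PySem.List.pyGetD processes s.1 0,
     max s.2.2 (s.2.1 + PySem.List.pyGetD processes i 0))
  else (s.1, s.2.1 + PySem.List.pyGetD processes i 0, s.2.2)

def pvA (processes : List Int) (m : Int) (k : Nat) : Int × Int × Int :=
  (PySem.List.pyRange 0 (k : Int) 1).foldl (pvAstep processes m) (0, 0, 0)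

lemma pvA_succ (processes : List Int) (m : Int) (k : Nat) :
    pvA processes m (k + 1) = pvAstep processes m (pvA processes m k) (k : Int) := by
  unfold pvA
  have h : ((k + 1 : Nat) : Int) = (k : Int) + 1 := by push_cast; ring
  rw [h, PySem.List.pyRange_one_succ_right (by positivity), List.foldl_append]
  simp

-- A's best-window accumulator: max over the first t windows of size mn
def pvM (processes : List Int) (mn : Nat) (t : Nat) : Int :=
  (List.range t).foldl (fun acc j => max acc (pvS processes (j + mn) - pvS processes j)) 0

lemma pvA_inv_none (processes : List Int) (m : Int)
    (hm : m ≤ 0 ∨ (processes.length : Int) < m) :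
    ∀ k, k ≤ processes.length → pvA processes m k = (0, pvS processes k, 0) := by
  intro k
  induction k with
  | zero => intro _; simp [pvA, pvS]
  | succ k ih =>
      intro hk
      rw [pvA_succ, ih (by omega)]
      unfold pvAstep
      have hne : ¬(((k : Int) - 0) + 1 = m) := by
        rcases hm with h | h
        · omega
        · have : (k : Int) + 1 ≤ (processes.length : Int) := by exact_mod_cast hk
          omega
      rw [if_neg hne]
      have hg := pvS_succ processes k (by omega)
      simp [PySem.List.pyGetD_natCast, hg]

lemma pvA_inv (processes : List Int) (mn : Nat) (h1 : 1 ≤ mn) :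
    ∀ k, k ≤ processes.length →
      pvA processes (mn : Int) k =
        if k < mn then (0, pvS processes k, 0)
        else (((k - mn + 1 : Nat) : Int),
              pvS processes k - pvS processes (k - mn + 1),
              pvM processes mn (k - mn + 1)) := by
  intro k
  induction k with
  | zero => intro _; rw [if_pos (by omega)]; simp [pvA, pvS]
  | succ k ih =>
      intro hk
      rw [pvA_succ, ih (by omega)]
      have hget := pvS_succ processes k (by omega)
      by_cases hlt : k + 1 < mn
      · rw [if_pos (by omega), if_pos hlt]
        unfold pvAstep
        rw [if_neg (by omega : ¬(((k : Int) - 0) + 1 = (mn : Int)))]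
        simp [PySem.List.pyGetD_natCast, hget]
      · by_cases heq : k + 1 = mn
        · -- first full window
          rw [if_pos (by omega), if_neg (by omega)]
          unfold pvAstep
          rw [if_pos (by omega : ((k : Int) - 0) + 1 = (mn : Int))]
          have hk1 : k + 1 - mn + 1 = 1 := by omega
          have hg0 : PySem.List.pyGetD processes 0 0 = pvS processes 1 := by
        
            rw [PySem.List.pyGetD_ofNat' processes 0 0]
            have h := pvS_succ processes 0 (by omega)
            simp [pvS] at h ⊢
            omega
          have hM1 : pvM processes mn 1 = max 0 (pvS processes mn) := by
            simp [pvM, List.range_succ, pvS]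
          rw [hk1, hM1]
          simp only [Prod.mk.injEq, PySem.List.pyGetD_natCast]
          refine ⟨by norm_num, ?_, ?_⟩
          · rw [hg0]; omega
          · rw [← heq]; omega
        · -- sliding window
          have hge : mn ≤ k := by omega
          rw [if_neg (by omega), if_neg (by omega)]
          unfold pvAstep
          have hcast : ((k - mn + 1 : Nat) : Int) = (k : Int) - (mn : Int) + 1 := by
            push_cast [hge]; ring
          rw [if_pos (by omega : ((k : Int) - ((k - mn + 1 : Nat) : Int)) + 1 = (mn : Int))]
          have hgw : processes.getD (k - mn + 1) 0 = pvS processes (k - mn + 2) - pvS processes (k - mn + 1) := by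
            have h := pvS_succ processes (k - mn + 1) (by omega)
            rw [show k - mn + 1 + 1 = k - mn + 2 from by omega] at h
            omega
          have hM : pvM processes mn (k - mn + 2) = max (pvM processes mn (k - mn + 1))
              (pvS processes (k + 1) - pvS processes (k - mn + 1)) := by
            have h2 : k - mn + 2 = (k - mn + 1) + 1 := by omega
            rw [h2, pvM, List.range_succ, List.foldl_append]
            have h3 : k - mn + 1 + mn = k + 1 := by omega
            simp [pvM, h3]
          have h4 : k + 1 - mn + 1 = k - mn + 2 := by omega
          rw [h4, hM]
          simp only [Prod.mk.injEq, PySem.List.pyGetD_natCast, hgw]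
          refine ⟨by push_cast; omega, by omega, by omega⟩

-- ===== VERDICT (by name: the statement is the Claim_ definition above) =====
theorem minimizeMemory_spec : Claim_equal_minimizeMemory := by
  intro processes m _
  unfold Spec_minimizeMemory
  have hAdef : minimizeMemory processes m
      = processes.sum - (pvA processes m processes.length).2.2 := rfl
  have hBdef : minimizeMemory_alt processes m
      = (0 + processes.sum) -
        (if 1 ≤ m ∧ m ≤ (processes.length : Int) then
          (PySem.List.pyRange 0 ((processes.length : Int) - m + 1) 1).foldl
            (fun acc i => max acc (PySem.List.pyGetD (0 :: pvPsums 0 processes) (i + m) 0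
              - PySem.List.pyGetD (0 :: pvPsums 0 processes) i 0)) 0
        else 0) := by
    unfold minimizeMemory_alt
    rw [pvFoldB]
    simp
  rw [hAdef, hBdef]
  set n := processes.length with hn
  by_cases hg : 1 ≤ m ∧ m ≤ (n : Int)
  · obtain ⟨h1, h2⟩ := hg
    obtain ⟨mn, hm⟩ : ∃ mn : Nat, m = (mn : Int) := ⟨m.toNat, by omega⟩
    subst hm
    have hmn1 : 1 ≤ mn := by omega
    have hmnn : mn ≤ n := by
      have : (mn : Int) ≤ (n : Int) := by omega
      exact_mod_cast this
    rw [pvA_inv processes mn hmn1 n (le_refl _), if_neg (by omega)]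
    rw [if_pos ⟨h1, h2⟩]
    have hrange : ((n : Int) - (mn : Int) + 1) = ((n - mn + 1 : Nat) : Int) := by
      push_cast [hmnn]; ring
    rw [hrange, PySem.List.pyRange_zero_nat, List.foldl_map]
    have hB : (List.range (n - mn + 1)).foldl
        (fun acc (k : Nat) => max acc (PySem.List.pyGetD (0 :: pvPsums 0 processes) ((k : Int) + (mn : Int)) 0
          - PySem.List.pyGetD (0 :: pvPsums 0 processes) (k : Int) 0)) 0
        = pvM processes mn (n - mn + 1) := by
      unfold pvM
      apply PySem.List.foldl_congr_mem
      intro acc j hj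
      rw [List.mem_range] at hj
      have hc : ((j : Int) + (mn : Int)) = ((j + mn : Nat) : Int) := by push_cast; ring
      rw [hc, PySem.List.pyGetD_natCast, PySem.List.pyGetD_natCast,
        pvPref_getD processes (j + mn) (by omega), pvPref_getD processes j (by omega)]
    rw [hB]
    simp
  · have hm' : m ≤ 0 ∨ (n : Int) < m := by omega
    rw [pvA_inv_none processes m hm' n (le_refl _), if_neg hg]
    simp
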